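-- pv_equiv track=rewrite | github.com/SergeHall/codewars_katas_python | 07_лнг_Vasya_and_Plates.py | count_clean
-- ===== SOURCE A (Python) =====
-- def count_clean(bowls, plates, dishes):
--     wash = 0
--     for i in dishes:
--         if i == 1:
--             if bowls > 0:
--                 bowls -= 1
--             else:
--                 wash += 1
--
--         if i == 2:
--             if plates > 0:
--                 plates -= 1
--                 continue
--             if plates <= 0 and bowls > 0:
--                 bowls -= 1
--             else:
--                 wash += 1
--     return wash
-- ===== SOURCE B (Python) =====
-- def count_clean(bowls, plates, dishes):
--     c1 = sum(1 for x in dishes if x == 1)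
--     c2 = sum(1 for x in dishes if x == 2)
--     need = c1 + max(0, c2 - max(plates, 0))
--     return max(0, need - max(bowls, 0))
-- ===== Notes on version B (the rewrite author's own statement) =====
-- stated objective: simpler
-- what changed: Replaces the stateful simulation loop (mutating bowls/plates/wash per dish) with two counts of dish types followed by closed-form max-arithmetic.
import Mathlib
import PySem

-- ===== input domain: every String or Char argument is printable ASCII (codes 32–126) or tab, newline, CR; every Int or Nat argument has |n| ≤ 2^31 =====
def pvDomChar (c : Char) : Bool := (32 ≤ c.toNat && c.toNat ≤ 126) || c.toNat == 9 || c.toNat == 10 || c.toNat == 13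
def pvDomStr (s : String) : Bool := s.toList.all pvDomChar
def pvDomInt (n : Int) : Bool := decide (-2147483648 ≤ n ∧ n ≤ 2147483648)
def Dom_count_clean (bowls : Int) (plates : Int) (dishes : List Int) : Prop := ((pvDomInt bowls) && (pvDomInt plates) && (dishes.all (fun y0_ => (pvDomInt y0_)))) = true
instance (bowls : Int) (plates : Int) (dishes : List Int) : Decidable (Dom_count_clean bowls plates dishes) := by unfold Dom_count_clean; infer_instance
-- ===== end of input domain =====

-- B replaces A's stateful per-dish simulation by two counts plus closed-form max-arithmetic (simpler).

-- ===== PORT A =====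
-- one iteration of A's loop body over the mutable state (bowls, plates, wash)
def ccStep (s : Int × Int × Int) (i : Int) : Int × Int × Int :=
  let b := s.1; let p := s.2.1; let w := s.2.2
  -- if i == 1: ...
  let bw : Int × Int := if i = 1 then (if b > 0 then (b - 1, w) else (b, w + 1)) else (b, w)
  let b1 := bw.1; let w1 := bw.2
  -- if i == 2: ...
  if i = 2 then
    if p > 0 then (b1, p - 1, w1)
    else if p ≤ 0 ∧ b1 > 0 then (b1 - 1, p, w1)
    else (b1, p, w1 + 1)
  else (b1, p, w1)

def count_clean (bowls : Int) (plates : Int) (dishes : List Int) : Int :=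
  (dishes.foldl ccStep (bowls, plates, 0)).2.2

-- ===== PORT B =====
def count_clean_alt (bowls : Int) (plates : Int) (dishes : List Int) : Int :=
  let c1 : Int := (dishes.countP (fun x => x = 1) : Nat)
  let c2 : Int := (dishes.countP (fun x => x = 2) : Nat)
  let need := c1 + max 0 (c2 - max plates 0)
  max 0 (need - max bowls 0)

-- ===== PRECONDITION & SPEC =====
def Spec_count_clean (bowls : Int) (plates : Int) (dishes : List Int) (out : Int) : Prop := out = count_clean_alt bowls plates dishes
instance (bowls : Int) (plates : Int) (dishes : List Int) (out : Int) : Decidable (Spec_count_clean bowls plates dishes out) := by unfold Spec_count_clean; infer_instance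

-- ===== CLAIM (what is proved, stated in full; the proofs are below) =====
def Claim_equal_count_clean : Prop := ∀ (bowls : Int) (plates : Int) (dishes : List Int), Dom_count_clean bowls plates dishes → Spec_count_clean bowls plates dishes (count_clean bowls plates dishes)

-- ===== LEMMAS AND PROOFS =====

-- loop invariant: the fold's final wash equals the accumulated wash plus the closed form
theorem ccFold_wash (dishes : List Int) : ∀ (b p w : Int),
    (dishes.foldl ccStep (b, p, w)).2.2 =
      w + max 0 (((dishes.countP (fun x => x = 1) : Nat) : Int)
                 + max 0 (((dishes.countP (fun x => x = 2) : Nat) : Int) - max p 0) - max b 0) := by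
  induction dishes with
  | nil => intro b p w; simp
  | cons i t ih =>
    intro b p w
    simp only [List.foldl_cons, List.countP_cons, ccStep, decide_eq_true_eq]
    split_ifs <;> simp only [ih] <;> push_cast <;> omega

-- ===== VERDICT (by name: the statement is the Claim_ definition above) =====
theorem count_clean_spec : Claim_equal_count_clean := by
  intro bowls plates dishes _
  unfold Spec_count_clean count_clean count_clean_alt
  rw [ccFold_wash]
  simp
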